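-- pv_equiv track=rewrite | github.com/jceronch1/LLW-WIKI | scripts/app.py | _search_nodes
-- ===== SOURCE A (Python) =====
-- import unicodedata
--
-- def _norm(s):
--     """Normaliza texto: sin acentos, minúsculas."""
--     s = unicodedata.normalize('NFD', s)
--     s = ''.join(c for c in s if unicodedata.category(c) != 'Mn')
--     return s.lower()
--
-- def _search_nodes(query, nodes, max_results=15):
--     """Busca nodos por coincidencia de texto."""
--     terms = _norm(query).split()
--     if not terms:
--         return []
--     scored = []
--     for nid, nd in nodes.items():
--         ln = _norm(nd['label'])
--         idn = _norm(nid)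
--         sn = _norm(nd.get('snippet', ''))
--         score = sum(
--             (10 if t in ln else 0) + (5 if t in idn else 0) + (2 if t in sn else 0)
--             for t in terms
--         )
--         if score > 0:
--             scored.append((nid, score))
--     scored.sort(key=lambda x: -x[1])
--     return [nid for nid, _ in scored[:max_results]]
-- ===== SOURCE B (Python) =====
-- import unicodedata
--
-- def _norm(s):
--     """Normaliza texto: sin acentos, minúsculas."""
--     s = unicodedata.normalize('NFD', s)
--     s = ''.join(c for c in s if unicodedata.category(c) != 'Mn')
--     return s.lower()
--
-- def _search_nodes(query, nodes, max_results=15):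
--     """Busca nodos por coincidencia de texto (bucket sort por puntaje)."""
--     terms = _norm(query).split()
--     if not terms:
--         return []
--     buckets = {}  # score -> nids in insertion order
--     best = 0
--     for nid, nd in nodes.items():
--         ln = _norm(nd['label'])
--         idn = _norm(nid)
--         sn = _norm(nd.get('snippet', ''))
--         score = 0
--         for t in terms:
--             if t in ln:
--                 score += 10
--             if t in idn:
--                 score += 5
--             if t in sn:
--                 score += 2
--         if score > 0:
--             buckets.setdefault(score, []).append(nid)
--             if score > best:
--                 best = score
--     ranked = []
--     for s in range(best, 0, -1):
--         ranked.extend(buckets.get(s, []))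
--     return ranked[:max_results]
-- ===== Notes on version B (the rewrite author's own statement) =====
-- stated objective: alternative
-- what changed: B replaces A's build-then-comparison-sort (append (nid,score) pairs, sort by -score, slice, project) by a counting/bucket scheme: each qualifying nid is appended to a bucket keyed by its integer score while the running maximum score is tracked, and the ranked list is produced by concatenating buckets from the maximum score down to 1, which reproduces the stable descending order without any sort.
import Mathlib
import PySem

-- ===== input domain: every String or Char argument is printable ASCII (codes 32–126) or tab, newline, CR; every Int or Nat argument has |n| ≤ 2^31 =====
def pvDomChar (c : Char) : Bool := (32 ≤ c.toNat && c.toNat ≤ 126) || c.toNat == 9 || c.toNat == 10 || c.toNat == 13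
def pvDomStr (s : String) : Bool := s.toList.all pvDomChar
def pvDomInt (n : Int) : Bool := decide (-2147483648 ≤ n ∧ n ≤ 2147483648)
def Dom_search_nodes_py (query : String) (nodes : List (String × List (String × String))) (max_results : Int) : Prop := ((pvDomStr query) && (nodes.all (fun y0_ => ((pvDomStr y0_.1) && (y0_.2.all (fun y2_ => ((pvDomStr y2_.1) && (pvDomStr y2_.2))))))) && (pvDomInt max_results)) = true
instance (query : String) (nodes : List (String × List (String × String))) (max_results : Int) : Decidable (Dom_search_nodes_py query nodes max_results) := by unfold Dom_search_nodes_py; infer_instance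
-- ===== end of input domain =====

-- B replaces A's comparison sort of (nid, score) pairs by score buckets concatenated from the
-- maximum score down to 1 (same stable descending order, no sort); objective: alternative.
-- On the ASCII domain above, Python's _norm(s) = NFD-normalize, drop 'Mn' marks, lower() is
-- exactly s.lower(): NFD is the identity on ASCII and ASCII has no combining marks, so the
-- ports use PySem.Str.lower (exact on this domain).

-- ===== PORT A =====
-- shared helpers (Python's _norm of nd['label'], nid, nd.get('snippet','')); nd['label'] raises
-- KeyError when 'label' is missing — those inputs are excluded by Pre_, the port uses getD there.
def pvNormLabel (p : String × List (String × String)) : String :=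
  PySem.Str.lower ((PySem.Dict.ofList p.2).getD "label" "")
def pvNormId (p : String × List (String × String)) : String :=
  PySem.Str.lower p.1
def pvNormSnip (p : String × List (String × String)) : String :=
  PySem.Str.lower ((PySem.Dict.ofList p.2).getD "snippet" "")
-- one summand of A's generator expression
def pvTermScore (p : String × List (String × String)) (t : String) : Int :=
  (if PySem.Str.isIn t (pvNormLabel p) then (10 : Int) else 0)
  + (if PySem.Str.isIn t (pvNormId p) then (5 : Int) else 0)
  + (if PySem.Str.isIn t (pvNormSnip p) then (2 : Int) else 0)
-- A's score: sum(... for t in terms)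
def pvScoreA (terms : List String) (p : String × List (String × String)) : Int :=
  (terms.map (pvTermScore p)).sum

def search_nodes_py (query : String) (nodes : List (String × List (String × String))) (max_results : Int) : List String :=
  let terms := PySem.Str.split₀ (PySem.Str.lower query)
  if terms = [] then []
  else
    let scored := (PySem.Dict.ofList nodes).items.foldl (fun acc p =>
      let score := pvScoreA terms p
      if score > 0 then acc ++ [(p.1, score)] else acc) []
    let sortedScored := PySem.List.sorted scored (fun x => -x.2) false
    (PySem.List.slice sortedScored none (some max_results)).map (fun q => q.1)

-- ===== PORT B =====
-- B's score: the same three tests as separate if-statements accumulating into score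
def pvScoreB (terms : List String) (p : String × List (String × String)) : Int :=
  terms.foldl (fun s t =>
    let s1 := if PySem.Str.isIn t (pvNormLabel p) then s + 10 else s
    let s2 := if PySem.Str.isIn t (pvNormId p) then s1 + 5 else s1
    if PySem.Str.isIn t (pvNormSnip p) then s2 + 2 else s2) 0

def search_nodes_py_alt (query : String) (nodes : List (String × List (String × String))) (max_results : Int) : List String :=
  let terms := PySem.Str.split₀ (PySem.Str.lower query)
  if terms = [] then []
  else
    -- buckets : score -> nids in insertion order; best : running maximum score
    let st := (PySem.Dict.ofList nodes).items.foldl (fun st p =>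
      let score := pvScoreB terms p
      if score > 0 then
        (st.1.modify score [] (· ++ [p.1]), if score > st.2 then score else st.2)
      else st)
      ((PySem.Dict.empty : PySem.Dict Int (List String)), (0 : Int))
    let ranked := (PySem.List.pyRange st.2 0 (-1)).foldl (fun acc s => acc ++ st.1.getD s []) []
    PySem.List.slice ranked none (some max_results)

-- ===== PRECONDITION & SPEC =====
-- Pre_ excludes exactly the inputs where A raises KeyError: some searched node dict has no
-- 'label' key while the query has at least one term (with no terms A returns [] untouched).
def Pre_search_nodes_py (query : String) (nodes : List (String × List (String × String))) (max_results : Int) : Prop :=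
  PySem.Str.split₀ (PySem.Str.lower query) ≠ [] →
    ∀ nd ∈ (PySem.Dict.ofList nodes).values, nd.any (fun kv => kv.1 == "label") = true
instance (query : String) (nodes : List (String × List (String × String))) (max_results : Int) : Decidable (Pre_search_nodes_py query nodes max_results) := by unfold Pre_search_nodes_py; infer_instance

def pvWitness_search_nodes_py : String × (List (String × List (String × String))) × Int :=
  ("my node", [("n1", [("label", "My Node"), ("snippet", "some text")]), ("n2", [("label", "Other")])], 15)

def Spec_search_nodes_py (query : String) (nodes : List (String × List (String × String))) (max_results : Int) (out : List String) : Prop := out = search_nodes_py_alt query nodes max_results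
instance (query : String) (nodes : List (String × List (String × String))) (max_results : Int) (out : List String) : Decidable (Spec_search_nodes_py query nodes max_results out) := by unfold Spec_search_nodes_py; infer_instance

-- ===== CLAIM (what is proved, stated in full; the proofs are below) =====
def Claim_equal_search_nodes_py : Prop := ∀ (query : String) (nodes : List (String × List (String × String))) (max_results : Int), Dom_search_nodes_py query nodes max_results → Pre_search_nodes_py query nodes max_results → Spec_search_nodes_py query nodes max_results (search_nodes_py query nodes max_results)

-- ===== LEMMAS AND PROOFS =====

-- B's three-if accumulation equals adding A's per-term summand
lemma pvScore_eq (terms : List String) (p : String × List (String × String)) :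
    pvScoreB terms p = pvScoreA terms p := by
  have aux : ∀ (l : List String) (s0 : Int),
      l.foldl (fun s t =>
        let s1 := if PySem.Str.isIn t (pvNormLabel p) then s + 10 else s
        let s2 := if PySem.Str.isIn t (pvNormId p) then s1 + 5 else s1
        if PySem.Str.isIn t (pvNormSnip p) then s2 + 2 else s2) s0
      = s0 + (l.map (pvTermScore p)).sum := by
    intro l
    induction l with
    | nil => simp
    | cons t l ih =>
      intro s0
      simp only [List.foldl_cons, List.map_cons, List.sum_cons, ih]
      unfold pvTermScore
      split_ifs <;> ring
  simpa using aux terms 0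

-- insertBy walks past a prefix it never goes before
lemma pvInsertBy_append {α : Type} (bef : α → α → Bool) (x : α) (u v : List α)
    (h : ∀ y ∈ u, bef x y = false) :
    PySem.List.insertBy bef x (u ++ v) = u ++ PySem.List.insertBy bef x v := by
  induction u with
  | nil => simp
  | cons y u ih =>
    have hy := h y (by simp)
    simp only [List.cons_append, PySem.List.insertBy, hy]
    simp only [Bool.false_eq_true, if_false, List.cons.injEq, true_and]
    exact ih (fun z hz => h z (by simp [hz]))

-- insertBy goes straight to the front of a list it always goes before
lemma pvInsertBy_front {α : Type} (bef : α → α → Bool) (x : α) (v : List α)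
    (h : ∀ y ∈ v, bef x y = true) :
    PySem.List.insertBy bef x v = x :: v := by
  cases v with
  | nil => rfl
  | cons y v => simp [PySem.List.insertBy, h y (by simp)]

-- inserting x into descending buckets appends x at the end of its own bucket
lemma pvInsert_buckets {α : Type} (key : α → Int) (x : α) :
    ∀ (ks : List Int) (F : Int → List α), ks.Pairwise (fun a b => b < a) → key x ∈ ks →
      (∀ s ∈ ks, ∀ a ∈ F s, key a = s) →
      PySem.List.insertBy (fun a b => decide (-(key a) < -(key b))) x (ks.flatMap F)
        = ks.flatMap (fun s => F s ++ if key x == s then [x] else []) := by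
  intro ks
  induction ks with
  | nil => intro F _ hx; simp at hx
  | cons s ks ih =>
    intro F hpw hx hF
    have hlt : ∀ s' ∈ ks, s' < s := (List.pairwise_cons.mp hpw).1
    have hpw' := (List.pairwise_cons.mp hpw).2
    have hFs : ∀ a ∈ F s, key a = s := hF s (by simp)
    simp only [List.flatMap_cons]
    by_cases hxs : key x = s
    · -- x belongs to the head bucket: walk past F s, then go before everything
      have h1 : ∀ y ∈ F s, (fun a b => decide (-(key a) < -(key b))) x y = false := by
        intro y hy; simp [hFs y hy, hxs]
      rw [pvInsertBy_append _ _ _ _ h1]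
      have h2 : ∀ y ∈ ks.flatMap F, (fun a b => decide (-(key a) < -(key b))) x y = true := by
        intro y hy
        obtain ⟨s', hs', hy'⟩ := List.mem_flatMap.mp hy
        have := hF s' (by simp [hs']) y hy'
        have := hlt s' hs'
        simp only [decide_eq_true_eq]
        omega
      rw [pvInsertBy_front _ _ _ h2]
      have h3 : ks.flatMap (fun s' => F s' ++ if key x == s' then [x] else []) = ks.flatMap F := by
        apply List.flatMap_congr
        intro s' hs'
        have : key x ≠ s' := by have := hlt s' hs'; omega
        simp [this]
      rw [h3, hxs]
      simp
    · -- x belongs to a later bucket: walk past F s and recurse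
      have hx' : key x ∈ ks := by
        rcases List.mem_cons.mp hx with h | h
        · exact absurd h hxs
        · exact h
      have h1 : ∀ y ∈ F s, (fun a b => decide (-(key a) < -(key b))) x y = false := by
        intro y hy
        have hys := hFs y hy
        have : key x < s := hlt _ hx'
        simp only [decide_eq_false_iff_not]
        omega
      rw [pvInsertBy_append _ _ _ _ h1,
        ih F hpw' hx' (fun s' hs' => hF s' (by simp [hs']))]
      have : (key x == s) = false := by simp [hxs]
      simp [this]

-- the stable sort by descending score IS the concatenation of the score buckets
lemma pvStable {α : Type} (key : α → Int) (ks : List Int) (hk : ks.Pairwise (fun a b => b < a)) :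
    ∀ (l : List α), (∀ a ∈ l, key a ∈ ks) →
      PySem.List.sorted l (fun a => -(key a)) false
        = ks.flatMap (fun s => l.filter (fun a => key a == s)) := by
  intro l
  induction l using List.reverseRecOn with
  | nil => simp [PySem.List.sorted_eq_foldl_insertBy, List.flatMap]
  | append_singleton l x ih =>
    intro hcov
    have hcl : ∀ a ∈ l, key a ∈ ks := fun a ha => hcov a (by simp [ha])
    have hx : key x ∈ ks := hcov x (by simp)
    rw [PySem.List.sorted_eq_foldl_insertBy, List.foldl_append]
    rw [← PySem.List.sorted_eq_foldl_insertBy, ih hcl]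
    simp only [List.foldl_cons, List.foldl_nil]
    rw [pvInsert_buckets key x ks _ hk hx
      (by intro s hs a ha; simpa using ((List.mem_filter.mp ha).2))]
    apply List.flatMap_congr
    intro s hs
    simp [List.filter_append, List.filter_singleton, beq_iff_eq]

-- pyRange best 0 (-1) = [best, best-1, …, 1]
lemma pvRange_desc (b : Int) :
    PySem.List.pyRange b 0 (-1) = (List.range b.toNat).map (fun k : Nat => b - (k : Int)) := by
  unfold PySem.List.pyRange
  norm_num
  have hf : (fun k : Nat => b + -(k : Int)) = fun k : Nat => b - (k : Int) := by
    funext k; ring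
  rw [hf]
  by_cases h : 0 < b
  · rw [if_pos h]
  · rw [if_neg h]
    have : b.toNat = 0 := by omega
    rw [this]

lemma pvRange_desc_pairwise (b : Int) :
    (PySem.List.pyRange b 0 (-1)).Pairwise (fun a c => c < a) := by
  rw [pvRange_desc]
  refine List.Pairwise.map _ ?_ List.pairwise_lt_range
  intro i j h
  omega

lemma pvRange_desc_mem {b s : Int} (h1 : 1 ≤ s) (h2 : s ≤ b) :
    s ∈ PySem.List.pyRange b 0 (-1) := by
  rw [pvRange_desc]
  refine List.mem_map.mpr ⟨(b - s).toNat, List.mem_range.mpr (by omega), by omega⟩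

-- fold of running max: lower bounds
lemma pvMaxFold_le {α : Type} (score : α → Int) (l : List α) :
    ∀ b0 : Int, b0 ≤ l.foldl (fun b p => if score p > b then score p else b) b0 := by
  induction l with
  | nil => simp
  | cons p l ih =>
    intro b0
    simp only [List.foldl_cons]
    have := ih (if score p > b0 then score p else b0)
    split_ifs at * <;> omega

lemma pvMaxFold_ge {α : Type} (score : α → Int) (l : List α) :
    ∀ b0 : Int, ∀ p ∈ l, score p ≤ l.foldl (fun b p => if score p > b then score p else b) b0 := by
  induction l with
  | nil => simp
  | cons q l ih =>
    intro b0 p hp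
    simp only [List.foldl_cons]
    rcases List.mem_cons.mp hp with h | h
    · subst h
      have := pvMaxFold_le score l (if score p > b0 then score p else b0)
      split_ifs at * <;> omega
    · exact ih _ p h

-- B's pair-state fold computes (buckets, best) componentwise
lemma pvSplit {α : Type} (sc : α → Int) (nm : α → String) (l : List α) :
    l.foldl (fun (st : PySem.Dict Int (List String) × Int) p =>
        ((if sc p > 0 then st.1.modify (sc p) [] (· ++ [nm p]) else st.1),
         (if sc p > 0 then (if sc p > st.2 then sc p else st.2) else st.2)))
      (PySem.Dict.empty, 0)
    = (l.foldl (fun d p => if sc p > 0 then d.modify (sc p) [] (· ++ [nm p]) else d)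
         PySem.Dict.empty,
       l.foldl (fun b p => if sc p > 0 then (if sc p > b then sc p else b) else b) 0) :=
  PySem.List.foldl_prod_mk
    (fun d p => if sc p > 0 then d.modify (sc p) [] (· ++ [nm p]) else d)
    (fun b p => if sc p > 0 then (if sc p > b then sc p else b) else b) l PySem.Dict.empty 0

-- grouping fold over pairs (score p, nid p), seen as a fold over the mapped list
lemma pvFoldMap {α : Type} (sc : α → Int) (nm : α → String) (l : List α)
    (d : PySem.Dict Int (List String)) :
    l.foldl (fun d p => d.modify (sc p) [] (· ++ [nm p])) d
    = (l.map (fun p => (sc p, nm p))).foldl (fun d q => d.modify q.1 [] (· ++ [q.2])) d := by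
  induction l generalizing d with
  | nil => rfl
  | cons p l ih => simp [ih]

-- map commutes with Python's prefix slice
lemma pvSlice_map {α β : Type} (f : α → β) (L : List α) (m : Int) :
    (PySem.List.slice L none (some m)).map f = PySem.List.slice (L.map f) none (some m) := by
  simp [PySem.List.slice, List.map_take]

-- ===== VERDICT (by name: the statement is the Claim_ definition above) =====
theorem search_nodes_py_spec : Claim_equal_search_nodes_py := by
  intro query nodes max_results _ _
  unfold Spec_search_nodes_py
  simp only [search_nodes_py, search_nodes_py_alt, pvScore_eq]
  by_cases ht : PySem.Str.split₀ (PySem.Str.lower query) = []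
  · simp [ht]
  · simp only [if_neg ht]
    set terms := PySem.Str.split₀ (PySem.Str.lower query) with hterms
    set items := (PySem.Dict.ofList nodes).items with hitems
    set S := items.filter (fun p => decide (pvScoreA terms p > 0)) with hS
    -- A's scored list is the filtered-and-scored nodes, in order
    have hA : items.foldl (fun acc p =>
          if pvScoreA terms p > 0 then acc ++ [(p.1, pvScoreA terms p)] else acc)
          ([] : List (String × Int))
        = S.map (fun p => (p.1, pvScoreA terms p)) := by
      simpa [hS] using PySem.List.foldl_append_ite
        (fun p => pvScoreA terms p > 0) (fun p => (p.1, pvScoreA terms p)) items []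
    -- B's pair-state fold splits into its two components
    have hpair : (fun (st : PySem.Dict Int (List String) × Int) p =>
          if pvScoreA terms p > 0 then
            (st.1.modify (pvScoreA terms p) [] (· ++ [p.1]),
             if pvScoreA terms p > st.2 then pvScoreA terms p else st.2)
          else st)
        = fun (st : PySem.Dict Int (List String) × Int) p =>
            ((if pvScoreA terms p > 0 then st.1.modify (pvScoreA terms p) [] (· ++ [p.1]) else st.1),
             (if pvScoreA terms p > 0 then
                (if pvScoreA terms p > st.2 then pvScoreA terms p else st.2) else st.2)) := by
      funext st p
      by_cases h : pvScoreA terms p > 0 <;> simp [h]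
    rw [hpair]
    rw [pvSplit (pvScoreA terms) (fun p => p.1) items]
    set best := items.foldl (fun b p =>
        if pvScoreA terms p > 0 then
          (if pvScoreA terms p > b then pvScoreA terms p else b) else b) 0 with hbestdef
    have hbest : best = S.foldl (fun b p =>
        if pvScoreA terms p > b then pvScoreA terms p else b) 0 := by
      rw [hbestdef, PySem.List.foldl_ite_eq_foldl_filter
        (fun p => pvScoreA terms p > 0) _ items 0]
    -- B's buckets, read back per score
    have hbuckets : ∀ s : Int,
        (items.foldl (fun d p =>
            if pvScoreA terms p > 0 then d.modify (pvScoreA terms p) [] (· ++ [p.1]) else d)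
            PySem.Dict.empty).getD s []
        = (S.filter (fun p => pvScoreA terms p == s)).map (fun p => p.1) := by
      intro s
      rw [PySem.List.foldl_ite_eq_foldl_filter (fun p => pvScoreA terms p > 0) _ items _]
      rw [show (List.filter (fun p => decide (pvScoreA terms p > 0)) items).foldl
            (fun d p => d.modify (pvScoreA terms p) [] (· ++ [p.1])) PySem.Dict.empty
          = ((List.filter (fun p => decide (pvScoreA terms p > 0)) items).map
              (fun p => (pvScoreA terms p, p.1))).foldl
              (fun d (q : Int × String) => d.modify q.1 [] (· ++ [q.2])) PySem.Dict.empty from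
        pvFoldMap (pvScoreA terms) (fun p => p.1)
          (List.filter (fun p => decide (pvScoreA terms p > 0)) items) PySem.Dict.empty]
      rw [PySem.Dict.getD_foldl_modify_append]
      simp [List.filter_map, Function.comp_def, List.map_map, hS]
    -- every stored score lies in [1, best]
    have hcov : ∀ q ∈ S.map (fun p => (p.1, pvScoreA terms p)),
        (fun q : String × Int => q.2) q ∈ PySem.List.pyRange best 0 (-1) := by
      intro q hq
      obtain ⟨p, hp, rfl⟩ := List.mem_map.mp hq
      have hp1 : pvScoreA terms p > 0 := by
        simpa using (List.mem_filter.mp hp).2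
      have hp2 : pvScoreA terms p ≤ best := by
        rw [hbest]
        exact pvMaxFold_ge (pvScoreA terms) S 0 p hp
      show pvScoreA terms p ∈ PySem.List.pyRange best 0 (-1)
      exact pvRange_desc_mem (by omega) hp2
    have hsorted := pvStable (fun q : String × Int => q.2)
      (PySem.List.pyRange best 0 (-1)) (pvRange_desc_pairwise best)
      (S.map (fun p => (p.1, pvScoreA terms p))) hcov
    beta_reduce at hsorted
    rw [hA, hsorted, pvSlice_map, PySem.List.foldl_append_eq_flatMap, List.nil_append]
    congr 1
    rw [List.map_flatMap]
    apply List.flatMap_congr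
    intro s _
    rw [hbuckets s]
    simp [List.filter_map, Function.comp_def, List.map_map]
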